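-- pv_equiv track=rewrite | github.com/brainsmoke/esp32leddriver | firmware/pdk/softpwm/test/intelhex.py | generate
-- ===== SOURCE A (Python) =====
-- def _record(addr, type_, arr):
--     line = [len(arr), (addr>>8)&0xff, addr&0xff, type_] + arr
--     line.append( -sum(line) & 0xff )
--     return ':{:s}\n'.format(bytes.hex(bytes(line)).upper())
--
-- def generate_line(base_addr, arr):
--     s = ''
--     if base_addr > 0xffff:
--         s = _record(0,4,base_addr>>16)
--     return s + _record(base_addr&0xffff, 0, arr)
--
-- def generate(m):
--     lines = {}
--     for k, v in m.items():
--         addr = k&~0x1f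
--         off  = k& 0x1f
--         if addr not in lines:
--             lines[addr] = [None]*32
--         lines[addr][off] = v
--     s = ''
--     for base_addr in sorted(lines):
--         line = lines[base_addr]
--         start = 0
--         for i,v in enumerate(line):
--             if v == None:
--                 if start < i:
--                     s+=generate_line(base_addr+start, line[start:i])
--                 start = i+1
--         if start < 32:
--             s+=generate_line(base_addr+start, line[start:32])
--     s += _record(0,1,[])
--     return s
-- ===== SOURCE B (Python) =====
-- def _record(addr, type_, arr):
--     line = [len(arr), (addr>>8)&0xff, addr&0xff, type_] + arr
--     line.append( -sum(line) & 0xff )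
--     return ':{:s}\n'.format(bytes.hex(bytes(line)).upper())
--
-- def generate_line(base_addr, arr):
--     s = ''
--     if base_addr > 0xffff:
--         s = _record(0,4,base_addr>>16)
--     return s + _record(base_addr&0xffff, 0, arr)
--
-- def generate(m):
--     # sort the items once and walk them, accumulating maximal runs of
--     # consecutive addresses inside one 32-byte-aligned block
--     s = ''
--     run_start = None
--     run = []
--     prev = None
--     for k, v in sorted(m.items(), key=lambda kv: kv[0]):
--         if prev is not None and k == prev + 1 and (k & ~0x1f) == (prev & ~0x1f):
--             run.append(v)
--         else:
--             if prev is not None: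
--                 s += generate_line(run_start, run)
--             run_start, run = k, [v]
--         prev = k
--     if prev is not None:
--         s += generate_line(run_start, run)
--     return s + _record(0, 1, [])
-- ===== Notes on version B (the rewrite author's own statement) =====
-- stated objective: simpler
-- what changed: B drops A's dict of dense 32-slot None-padded arrays and its per-block 32-position gap scan: it sorts the items once and walks them in a single pass, flushing a record whenever the next address is not exactly prev+1 or crosses a 32-byte-aligned block boundary.
import Mathlib
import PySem

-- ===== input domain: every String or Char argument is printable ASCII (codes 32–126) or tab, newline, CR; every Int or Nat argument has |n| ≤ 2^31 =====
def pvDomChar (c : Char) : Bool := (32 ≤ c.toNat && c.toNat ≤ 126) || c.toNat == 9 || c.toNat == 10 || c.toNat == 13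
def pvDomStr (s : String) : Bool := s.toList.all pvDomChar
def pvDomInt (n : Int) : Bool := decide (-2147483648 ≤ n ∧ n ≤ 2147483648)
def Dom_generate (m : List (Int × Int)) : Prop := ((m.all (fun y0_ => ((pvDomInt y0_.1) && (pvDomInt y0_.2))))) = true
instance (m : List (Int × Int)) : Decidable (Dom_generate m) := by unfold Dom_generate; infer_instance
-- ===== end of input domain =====

-- B replaces A's dict of dense 32-slot None-padded arrays (and its per-block 32-position
-- gap scan) by one sorted walk over the items that accumulates maximal runs of consecutive
-- addresses inside a 32-byte-aligned block; simpler, same output.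

-- ===== PORT A =====
-- shared low-level serializers, transliterations of the module helpers _record / generate_line
-- (both Source A and Source B contain them verbatim; both ports call them)

-- one uppercase hex digit (Python computes bytes.hex(...).upper(); producing the
-- uppercase digit directly is exact: .upper() on a hex digit is that mapping)
def hexDigit (n : Nat) : Char := if n < 10 then Char.ofNat (48 + n) else Char.ofNat (55 + n)

-- the two uppercase hex chars of one byte of bytes.hex (exact for 0 ≤ b < 256;
-- bytes() raises ValueError outside that range — excluded by Pre_generate)
def byteHex (b : Int) : List Char := [hexDigit (b.toNat / 16), hexDigit (b.toNat % 16)]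

-- _record(addr, type_, arr)
def record (addr : Int) (type_ : Int) (arr : List Int) : String :=
  let line := [(arr.length : Int), PySem.Int.band (addr >>> 8) 0xff, PySem.Int.band addr 0xff, type_] ++ arr
  let line := line ++ [PySem.Int.band (-(line.sum)) 0xff]
  String.ofList (':' :: (line.flatMap byteHex ++ ['\n']))

-- generate_line(base_addr, arr).  When base_addr > 0xffff the Python calls
-- _record(0, 4, base_addr >> 16) with an int where a list is expected and raises
-- TypeError (len(int)); Pre_generate excludes keys ≥ 0x10000, so only the reachable
-- branch is ported.
def generateLine (base_addr : Int) (arr : List Int) : String :=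
  record (PySem.Int.band base_addr 0xffff) 0 arr

def generate (m : List (Int × Int)) : String :=
  let lines : PySem.Dict Int (List (Option Int)) :=
    m.foldl (fun lines kv =>
      let addr := PySem.Int.band kv.1 (Int.not 0x1f)
      let off := PySem.Int.band kv.1 0x1f
      let lines := if lines.contains addr then lines else lines.insert addr (List.replicate 32 none)
      -- lines[addr][off] = v; off = kv.1 & 0x1f is always in [0, 32) so .toNat and
      -- in-range List.set are exact here
      lines.modify addr (List.replicate 32 none) (fun line => line.set off.toNat (some kv.2)))
      PySem.Dict.empty
  let s : String :=
    (PySem.List.sorted lines.keys (fun x => x) false).foldl (fun s base_addr =>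
      let line := lines.getD base_addr (List.replicate 32 none)
      let p := (PySem.List.enumerate line).foldl (fun (p : String × Int) iv =>
        if iv.2 = none then
          ((if p.2 < iv.1 then
              p.1 ++ generateLine (base_addr + p.2)
                ((PySem.List.slice line (some p.2) (some iv.1)).map (fun o => o.getD 0))
            else p.1), iv.1 + 1)
        else p) (s, 0)
      if p.2 < 32 then
        p.1 ++ generateLine (base_addr + p.2)
          ((PySem.List.slice line (some p.2) (some 32)).map (fun o => o.getD 0))
      else p.1) ""
  s ++ record 0 1 []

-- ===== PORT B =====
def generate_alt (m : List (Int × Int)) : String :=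
  let st :=
    (PySem.List.sorted m (fun kv => kv.1) false).foldl
      (fun (st : String × Int × List Int × Option Int) kv =>
        match st.2.2.2 with
        | some p =>
          if kv.1 = p + 1 ∧ PySem.Int.band kv.1 (Int.not 0x1f) = PySem.Int.band p (Int.not 0x1f) then
            (st.1, st.2.1, st.2.2.1 ++ [kv.2], some kv.1)
          else
            (st.1 ++ generateLine st.2.1 st.2.2.1, kv.1, [kv.2], some kv.1)
        | none => (st.1, kv.1, [kv.2], some kv.1))
      ("", 0, [], none)
  (match st.2.2.2 with
   | some _ => st.1 ++ generateLine st.2.1 st.2.2.1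
   | none => st.1) ++ record 0 1 []

-- ===== PRECONDITION & SPEC =====
-- Pre_generate: the argument stands for a Python dict, so its keys are distinct (an
-- association list with a repeated key represents no dict); keys ≥ 0x10000 make A raise
-- TypeError (len(int) inside generate_line), and values outside 0..255 make A raise
-- ValueError (bytes() of an out-of-range int) — exactly the inputs where A raises.
def Pre_generate (m : List (Int × Int)) : Prop :=
  (m.map Prod.fst).Nodup ∧ ∀ kv ∈ m, kv.1 < 65536 ∧ 0 ≤ kv.2 ∧ kv.2 < 256
instance (m : List (Int × Int)) : Decidable (Pre_generate m) := by unfold Pre_generate; infer_instance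

def pvWitness_generate : (List (Int × Int)) := [(0, 1), (1, 2), (40, 3), (65535, 255)]

def Spec_generate (m : List (Int × Int)) (out : String) : Prop := out = generate_alt m
instance (m : List (Int × Int)) (out : String) : Decidable (Spec_generate m out) := by unfold Spec_generate; infer_instance

-- ===== CLAIM (what is proved, stated in full; the proofs are below) =====
def Claim_equal_generate : Prop := ∀ (m : List (Int × Int)), Dom_generate m → Pre_generate m → Spec_generate m (generate m)

-- ===== LEMMAS AND PROOFS =====

-- block base / offset of a key, exactly as both ports compute them
def blkI (k : Int) : Int := PySem.Int.band k (Int.not 0x1f)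
def offI (k : Int) : Int := PySem.Int.band k 0x1f

lemma lor31 (q r : Nat) (h : r < 32) : (32 * q + r) ||| 31 = 32 * q + 31 := by
  apply Nat.eq_of_testBit_eq
  intro i
  rw [Nat.testBit_or]
  rcases Nat.lt_or_ge i 5 with hi | hi
  · interval_cases i <;>
      simp [Nat.testBit_eq_decide_div_mod_eq] <;> omega
  · have h31 : Nat.testBit 31 i = false := Nat.testBit_lt_two_pow (by
      calc (31:Nat) < 2^5 := by norm_num
      _ ≤ 2^i := Nat.pow_le_pow_right (by norm_num) hi)
    rw [h31, Bool.or_false]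
    obtain ⟨j, rfl⟩ : ∃ j, i = 5 + j := ⟨i - 5, by omega⟩
    rw [Nat.testBit_eq_decide_div_mod_eq, Nat.testBit_eq_decide_div_mod_eq,
        Nat.pow_add, ← Nat.div_div_eq_div_mul, ← Nat.div_div_eq_div_mul]
    have e1 : (32 * q + r) / 2^5 = q := by omega
    have e2 : (32 * q + 31) / 2^5 = q := by omega
    rw [e1, e2]

lemma offI_eq (k : Int) : offI k = k % 32 := by
  unfold offI PySem.Int.band
  split_ifs with h1 h2 h3 <;> try omega
  · rw [show ((31:Int)).toNat = 2^5-1 from rfl, Nat.and_two_pow_sub_one_eq_mod k.toNat 5]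
    omega
  · rw [show ((31:Int)).toNat = 31 from rfl, show (31:Nat) = 2^5-1 from rfl,
        Nat.and_comm, Nat.and_two_pow_sub_one_eq_mod]
    have := Nat.mod_lt (-k-1).toNat (show 0 < 2^5 by norm_num)
    have h2 : ((-k-1).toNat : Int) % 32 = ((-k-1).toNat % (2^5) : Nat) := by push_cast; rfl
    omega

lemma blkI_eq (k : Int) : blkI k = k - k % 32 := by
  unfold blkI
  rw [show (Int.not 0x1f) = -32 by decide]
  unfold PySem.Int.band
  split_ifs with h1 h2 h3 <;> try omega
  · rw [show ((-(-32:Int)) - 1).toNat = 2^5-1 from rfl, Nat.and_two_pow_sub_one_eq_mod]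
    have := Nat.mod_lt k.toNat (show 0 < 2^5 by norm_num)
    have h2 : (k.toNat : Int) % 32 = (k.toNat % (2^5) : Nat) := by push_cast; rfl
    omega
  · rw [show ((-(-32:Int)) - 1).toNat = 31 from rfl]
    have hd : (-k-1).toNat = 32 * ((-k-1).toNat / 32) + (-k-1).toNat % 32 := by omega
    rw [hd, lor31 _ _ (by omega)]
    have h2 : ((-k-1).toNat : Int) % 32 = ((32 * ((-k-1).toNat / 32) + (-k-1).toNat % 32 : Nat) : Int) % 32 := by rw [← hd]
    push_cast at h2 ⊢
    omega

-- first-match value of key k in the association list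
def keyVal (m : List (Int × Int)) (k : Int) : Option Int :=
  (m.find? (fun kv => kv.1 == k)).map (·.2)

def vget (m : List (Int × Int)) (k : Int) : Int := (keyVal m k).getD 0

-- run decomposition of a strictly increasing key list: go a p ks = the maximal runs,
-- with a run (start, stop) open from a to p
def go (a p : Int) : List Int → List (Int × Int)
  | [] => [(a, p)]
  | k :: ks => if k = p + 1 ∧ blkI k = blkI p then go a k ks else (a, p) :: go k k ks

def chunks : List Int → List (Int × Int)
  | [] => []
  | k :: ks => go k k ks

def render (m : List (Int × Int)) (c : Int × Int) : String :=
  generateLine c.1 ((PySem.List.pyRange c.1 (c.2 + 1) 1).map (vget m))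

def sjoin (l : List String) : String := l.foldr (· ++ ·) ""

-- the common normal form both ports are proved equal to
def canon (m : List (Int × Int)) : String :=
  sjoin ((chunks (PySem.List.sorted (m.map Prod.fst) (fun x => x) false)).map (render m)) ++ record 0 1 []


-- ---------- B side ----------

lemma keyVal_of_mem {m : List (Int × Int)} (hnd : (m.map Prod.fst).Nodup) {k v : Int}
    (hm : (k, v) ∈ m) : keyVal m k = some v := by
  induction m with
  | nil => simp at hm
  | cons kv rest ih =>
    simp only [List.map_cons, List.nodup_cons] at hnd
    rcases List.mem_cons.mp hm with h | h
    · subst h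
      unfold keyVal
      simp
    · have hne : kv.1 ≠ k := by
        intro he
        exact hnd.1 (he ▸ (List.mem_map.mpr ⟨(k, v), h, rfl⟩))
      unfold keyVal
      rw [List.find?_cons_of_neg (by simpa using hne)]
      exact ih hnd.2 h

lemma vget_of_mem {m : List (Int × Int)} (hnd : (m.map Prod.fst).Nodup) {k v : Int}
    (hm : (k, v) ∈ m) : vget m k = v := by
  unfold vget
  rw [keyVal_of_mem hnd hm]
  rfl

lemma pair_map_keys {m : List (Int × Int)} (hnd : (m.map Prod.fst).Nodup) :
    (m.map Prod.fst).map (fun k => (k, vget m k)) = m := by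
  rw [List.map_map]
  calc m.map (fun kv => (kv.1, vget m kv.1))
      = m.map id := by
        apply List.map_congr_left
        intro kv hkv
        have := vget_of_mem hnd (show (kv.1, kv.2) ∈ m from hkv)
        simp [this]
    _ = m := List.map_id m

lemma sortedKeys_pairwise_lt {m : List (Int × Int)} (hnd : (m.map Prod.fst).Nodup) :
    List.Pairwise (· < ·) (PySem.List.sorted (m.map Prod.fst) (fun x => x)) := by
  have hle := PySem.List.sorted_pairwise (m.map Prod.fst) (fun x => x)
  have hnd' : (PySem.List.sorted (m.map Prod.fst) (fun x => x)).Nodup :=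
    (PySem.List.sorted_perm (m.map Prod.fst) (fun x => x) false).nodup_iff.mpr hnd
  exact (hle.and hnd').imp (fun h => lt_of_le_of_ne h.1 h.2)

lemma sorted_pairs_eq {m : List (Int × Int)} (hnd : (m.map Prod.fst).Nodup) :
    PySem.List.sorted m (fun kv => kv.1) =
      (PySem.List.sorted (m.map Prod.fst) (fun x => x)).map (fun k => (k, vget m k)) := by
  apply PySem.List.sorted_eq_of_perm_of_pairwise_lt
  · have h := (PySem.List.sorted_perm (m.map Prod.fst) (fun x => x) false).map
      (fun k => (k, vget m k))
    rwa [pair_map_keys hnd] at h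
  · rw [List.pairwise_map]
    exact sortedKeys_pairwise_lt hnd

-- B's loop body, on the (key, value) pairs it folds over
def stepB (st : String × Int × List Int × Option Int) (kv : Int × Int) :
    String × Int × List Int × Option Int :=
  match st.2.2.2 with
  | some p =>
    if kv.1 = p + 1 ∧ PySem.Int.band kv.1 (Int.not 0x1f) = PySem.Int.band p (Int.not 0x1f) then
      (st.1, st.2.1, st.2.2.1 ++ [kv.2], some kv.1)
    else
      (st.1 ++ generateLine st.2.1 st.2.2.1, kv.1, [kv.2], some kv.1)
  | none => (st.1, kv.1, [kv.2], some kv.1)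

lemma generate_alt_eq_stepB (m : List (Int × Int)) :
    generate_alt m =
      (match ((PySem.List.sorted m (fun kv => kv.1)).foldl stepB ("", 0, [], none)).2.2.2 with
       | some _ =>
         ((PySem.List.sorted m (fun kv => kv.1)).foldl stepB ("", 0, [], none)).1 ++
           generateLine ((PySem.List.sorted m (fun kv => kv.1)).foldl stepB ("", 0, [], none)).2.1
             ((PySem.List.sorted m (fun kv => kv.1)).foldl stepB ("", 0, [], none)).2.2.1
       | none => ((PySem.List.sorted m (fun kv => kv.1)).foldl stepB ("", 0, [], none)).1) ++
        record 0 1 [] := rfl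

lemma pyRange_self (a : Int) : PySem.List.pyRange a a = [] := by
  simp [PySem.List.pyRange]

lemma pyRange_singleton (k : Int) : PySem.List.pyRange k (k + 1) = [k] := by
  rw [PySem.List.pyRange_one_cons (by omega), pyRange_self]

lemma foldB (m : List (Int × Int)) (ks : List Int) :
    ∀ (out : String) (a p : Int), a ≤ p → (∀ k ∈ ks, p < k) → List.Pairwise (· < ·) ks →
    (match (ks.foldl (fun st k => stepB st (k, vget m k))
        (out, a, (PySem.List.pyRange a (p + 1)).map (vget m), some p)).2.2.2 with
     | some _ =>
       (ks.foldl (fun st k => stepB st (k, vget m k))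
          (out, a, (PySem.List.pyRange a (p + 1)).map (vget m), some p)).1 ++
         generateLine
           (ks.foldl (fun st k => stepB st (k, vget m k))
              (out, a, (PySem.List.pyRange a (p + 1)).map (vget m), some p)).2.1
           (ks.foldl (fun st k => stepB st (k, vget m k))
              (out, a, (PySem.List.pyRange a (p + 1)).map (vget m), some p)).2.2.1
     | none =>
       (ks.foldl (fun st k => stepB st (k, vget m k))
          (out, a, (PySem.List.pyRange a (p + 1)).map (vget m), some p)).1) =
      out ++ sjoin ((go a p ks).map (render m)) := by
  induction ks with
  | nil =>
    intro out a p _ _ _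
    simp only [List.foldl_nil, go, List.map_cons, List.map_nil, sjoin, List.foldr_cons,
      List.foldr_nil, String.append_empty]
    rfl
  | cons k ks ih =>
    intro out a p hap hgt hpw
    rw [List.foldl_cons]
    have hred : stepB (out, a, (PySem.List.pyRange a (p + 1)).map (vget m), some p) (k, vget m k) =
        if k = p + 1 ∧ PySem.Int.band k (Int.not 0x1f) = PySem.Int.band p (Int.not 0x1f) then
          (out, a, ((PySem.List.pyRange a (p + 1)).map (vget m)) ++ [vget m k], some k)
        else
          (out ++ generateLine a ((PySem.List.pyRange a (p + 1)).map (vget m)), k, [vget m k], some k) := rfl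
    rw [hred]
    by_cases hc : k = p + 1 ∧ PySem.Int.band k (Int.not 0x1f) = PySem.Int.band p (Int.not 0x1f)
    · rw [if_pos hc]
      have hrun : ((PySem.List.pyRange a (p + 1)).map (vget m)) ++ [vget m k] =
          (PySem.List.pyRange a (k + 1)).map (vget m) := by
        conv_rhs => rw [hc.1, PySem.List.pyRange_one_succ_right (show a ≤ p + 1 by omega)]
        rw [List.map_append, hc.1]
        rfl
      rw [hrun]
      rw [ih out a k (by omega)
        (fun k' hk' => (List.pairwise_cons.mp hpw).1 k' hk')
        (List.pairwise_cons.mp hpw).2]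
      have hgo : go a p (k :: ks) = go a k ks := by
        simp only [go, blkI]
        rw [if_pos hc]
      rw [hgo]
    · rw [if_neg hc]
      have hone : [vget m k] = (PySem.List.pyRange k (k + 1)).map (vget m) := by
        rw [pyRange_singleton]
        rfl
      rw [hone]
      rw [ih (out ++ generateLine a ((PySem.List.pyRange a (p + 1)).map (vget m))) k k le_rfl
        (fun k' hk' => (List.pairwise_cons.mp hpw).1 k' hk') (List.pairwise_cons.mp hpw).2]
      have hgo : go a p (k :: ks) = (a, p) :: go k k ks := by
        simp only [go, blkI]
        rw [if_neg hc]
      rw [hgo]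
      simp only [List.map_cons, sjoin, List.foldr_cons, String.append_assoc]
      rfl

lemma generate_alt_eq_canon (m : List (Int × Int)) (h : Pre_generate m) :
    generate_alt m = canon m := by
  rw [generate_alt_eq_stepB, canon]
  rw [sorted_pairs_eq h.1, List.foldl_map]
  cases hsk : PySem.List.sorted (m.map Prod.fst) (fun x => x) with
  | nil =>
    simp only [List.foldl_nil, chunks, List.map_nil, sjoin, List.foldr_nil, String.empty_append]
  | cons k ks =>
    have hpw := sortedKeys_pairwise_lt h.1
    rw [hsk] at hpw
    rw [List.foldl_cons]
    have hstep : stepB ("", 0, [], none) ((fun k => (k, vget m k)) k) =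
        ("", k, [vget m k], some k) := rfl
    rw [hstep]
    have hone : [vget m k] = (PySem.List.pyRange k (k + 1)).map (vget m) := by
      rw [pyRange_singleton]
      rfl
    rw [hone]
    rw [foldB m ks "" k k le_rfl (fun k' hk' => (List.pairwise_cons.mp hpw).1 k' hk')
      (List.pairwise_cons.mp hpw).2]
    simp only [chunks, String.empty_append]


-- ---------- A side ----------

def dflt32 : List (Option Int) := List.replicate 32 none

-- A's first loop body (building the dict of dense 32-slot lines)
def buildStep (lines : PySem.Dict Int (List (Option Int))) (kv : Int × Int) :
    PySem.Dict Int (List (Option Int)) :=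
  let addr := PySem.Int.band kv.1 (Int.not 0x1f)
  let off := PySem.Int.band kv.1 0x1f
  let lines := if lines.contains addr then lines else lines.insert addr (List.replicate 32 none)
  lines.modify addr (List.replicate 32 none) (fun line => line.set off.toNat (some kv.2))

def buildD (m : List (Int × Int)) : PySem.Dict Int (List (Option Int)) :=
  m.foldl buildStep PySem.Dict.empty

-- A's inner (gap-scan) loop body
def stepA (line : List (Option Int)) (base : Int) (p : String × Int) (iv : Int × Option Int) :
    String × Int :=
  if iv.2 = none then
    ((if p.2 < iv.1 then
        p.1 ++ generateLine (base + p.2)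
          ((PySem.List.slice line (some p.2) (some iv.1)).map (fun o => o.getD 0))
      else p.1), iv.1 + 1)
  else p

-- A's outer loop body
def bodyA (lines : PySem.Dict Int (List (Option Int))) (s : String) (base : Int) : String :=
  let line := lines.getD base (List.replicate 32 none)
  let p := (PySem.List.enumerate line).foldl (stepA line base) (s, 0)
  if p.2 < 32 then
    p.1 ++ generateLine (base + p.2)
      ((PySem.List.slice line (some p.2) (some 32)).map (fun o => o.getD 0))
  else p.1

lemma generate_unfold (m : List (Int × Int)) :
    generate m =
      (PySem.List.sorted (buildD m).keys (fun x => x)).foldl (bodyA (buildD m)) "" ++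
        record 0 1 [] := rfl

lemma buildStep_keys (d : PySem.Dict Int (List (Option Int))) (kv : Int × Int) :
    (buildStep d kv).keys =
      if blkI kv.1 ∈ d.keys then d.keys else d.keys ++ [blkI kv.1] := by
  unfold buildStep
  rw [PySem.Dict.keys_modify]
  by_cases h : blkI kv.1 ∈ d.keys
  · have hc : d.contains (PySem.Int.band kv.1 (Int.not 0x1f)) = true :=
      (PySem.Dict.contains_iff_mem_keys d _).mpr h
    rw [if_pos h]
    simp only [hc, if_true]
    exact PySem.Dict.keys_insert_of_contains d _ hc
  · have hc : d.contains (PySem.Int.band kv.1 (Int.not 0x1f)) = false := by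
      rw [← Bool.not_eq_true]
      intro hcc
      exact h ((PySem.Dict.contains_iff_mem_keys d _).mp hcc)
    rw [if_neg h]
    simp only [hc, Bool.false_eq_true, if_false]
    rw [PySem.Dict.keys_insert_of_contains _ _ (PySem.Dict.contains_insert_self d _ _)]
    exact PySem.Dict.keys_insert_of_not_contains d _ hc

lemma condInsert_getD (d : PySem.Dict Int (List (Option Int))) (addr a : Int) :
    ((if d.contains addr then d else d.insert addr dflt32).getD a dflt32) =
      d.getD a dflt32 := by
  by_cases h : d.contains addr
  · rw [if_pos h]
  · rw [if_neg h]
    rw [PySem.Dict.getD_insert]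
    by_cases ha : a = addr
    · rw [if_pos ha, ha,
        PySem.Dict.getD_of_not_contains d dflt32 (by simpa using h)]
    · rw [if_neg ha]

lemma buildStep_getD (d : PySem.Dict Int (List (Option Int))) (kv : Int × Int) (a : Int) :
    (buildStep d kv).getD a dflt32 =
      if a = blkI kv.1 then
        (d.getD (blkI kv.1) dflt32).set (offI kv.1).toNat (some kv.2)
      else d.getD a dflt32 := by
  unfold buildStep
  rw [show (List.replicate 32 (none : Option Int)) = dflt32 from rfl]
  rw [PySem.Dict.getD_modify]
  by_cases ha : a = blkI kv.1
  · rw [if_pos ha, if_pos (by exact ha), condInsert_getD]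
    rfl
  · rw [if_neg ha, if_neg (by exact ha), condInsert_getD]

lemma build_keys_mem_aux (ms : List (Int × Int)) :
    ∀ (d : PySem.Dict Int (List (Option Int))) (b : Int),
      b ∈ (ms.foldl buildStep d).keys ↔ b ∈ d.keys ∨ ∃ kv ∈ ms, blkI kv.1 = b := by
  induction ms with
  | nil => intro d b; simp
  | cons kv ms ih =>
    intro d b
    rw [List.foldl_cons, ih]
    have hk : b ∈ (buildStep d kv).keys ↔ b ∈ d.keys ∨ blkI kv.1 = b := by
      rw [buildStep_keys]
      split_ifs with h
      · constructor
        · exact fun hb => Or.inl hb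
        · rintro (hb | rfl) <;> [exact hb; exact h]
      · simp only [List.mem_append, List.mem_singleton]
        constructor
        · rintro (hb | rfl) <;> [exact Or.inl hb; exact Or.inr rfl]
        · rintro (hb | rfl) <;> [exact Or.inl hb; exact Or.inr rfl]
    rw [hk]
    simp only [List.mem_cons]
    constructor
    · rintro ((hb | rfl) | ⟨kv', hkv', rfl⟩)
      · exact Or.inl hb
      · exact Or.inr ⟨kv, Or.inl rfl, rfl⟩
      · exact Or.inr ⟨kv', Or.inr hkv', rfl⟩
    · rintro (hb | ⟨kv', hkv' | hkv', rfl⟩)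
      · exact Or.inl (Or.inl hb)
      · exact Or.inl (Or.inr (by rw [hkv']))
      · exact Or.inr ⟨kv', hkv', rfl⟩

lemma build_keys_mem (m : List (Int × Int)) :
    ∀ b, b ∈ (buildD m).keys ↔ ∃ kv ∈ m, blkI kv.1 = b := by
  intro b
  unfold buildD
  rw [build_keys_mem_aux]
  simp [PySem.Dict.keys_empty]

lemma build_keys_nodup_aux (ms : List (Int × Int)) :
    ∀ (d : PySem.Dict Int (List (Option Int))), d.keys.Nodup → (ms.foldl buildStep d).keys.Nodup := by
  induction ms with
  | nil => intro d hd; exact hd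
  | cons kv ms ih =>
    intro d hd
    rw [List.foldl_cons]
    apply ih
    rw [buildStep_keys]
    split_ifs with h
    · exact hd
    · rw [List.nodup_append]
      refine ⟨hd, List.nodup_singleton _, ?_⟩
      intro a ha b hb
      rw [List.mem_singleton] at hb
      subst hb
      exact fun he => h (by rw [← he]; exact ha)

lemma build_keys_nodup (m : List (Int × Int)) : (buildD m).keys.Nodup :=
  build_keys_nodup_aux m PySem.Dict.empty (by simp [PySem.Dict.keys_empty])

lemma build_len_aux (ms : List (Int × Int)) :
    ∀ (d : PySem.Dict Int (List (Option Int))),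
      (∀ a, (d.getD a dflt32).length = 32) → ∀ a, ((ms.foldl buildStep d).getD a dflt32).length = 32 := by
  induction ms with
  | nil => intro d hd; exact hd
  | cons kv ms ih =>
    intro d hd
    rw [List.foldl_cons]
    apply ih
    intro a
    rw [buildStep_getD]
    split_ifs with h
    · rw [List.length_set]
      exact hd _
    · exact hd a

lemma build_len (m : List (Int × Int)) :
    ∀ a, ((buildD m).getD a dflt32).length = 32 :=
  build_len_aux m PySem.Dict.empty (fun a => by rw [PySem.Dict.getD_empty]; rfl)

lemma offI_nonneg_lt (k : Int) : 0 ≤ offI k ∧ offI k < 32 := by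
  rw [offI_eq]
  omega

lemma build_elem_aux (ms : List (Int × Int)) :
    ∀ (d : PySem.Dict Int (List (Option Int))) (b : Int) (j : Nat), j < 32 →
      (∀ a, (d.getD a dflt32).length = 32) →
      ((ms.foldl buildStep d).getD b dflt32).getD j none =
        (match ms.reverse.find? (fun kv => blkI kv.1 == b && offI kv.1 == (j : Int)) with
         | some kv => some kv.2
         | none => (d.getD b dflt32).getD j none) := by
  induction ms with
  | nil => intro d b j hj hd; simp
  | cons kv ms ih =>
    intro d b j hj hd
    rw [List.foldl_cons]
    rw [ih (buildStep d kv) b j hj (fun a => by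
      rw [buildStep_getD]
      split_ifs with h
      · rw [List.length_set]; exact hd _
      · exact hd a)]
    rw [List.reverse_cons, List.find?_append]
    cases hf : ms.reverse.find? (fun kv => blkI kv.1 == b && offI kv.1 == (j : Int)) with
    | some kv' => rfl
    | none =>
      simp only [Option.none_or]
      rw [buildStep_getD]
      have hoff := offI_nonneg_lt kv.1
      by_cases hp : blkI kv.1 = b ∧ offI kv.1 = (j : Int)
      · have hfind : List.find? (fun kv => blkI kv.1 == b && offI kv.1 == (j : Int)) [kv] = some kv := by
          simp [List.find?, hp.1, hp.2]
        rw [hfind, if_pos hp.1.symm, hp.1]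
        have hjj : (offI kv.1).toNat = j := by omega
        rw [hjj, List.getD_eq_getElem?_getD, List.getElem?_set]
        rw [if_pos rfl, if_pos (by rw [hd]; exact hj)]
        rfl
      · have hfind : List.find? (fun kv => blkI kv.1 == b && offI kv.1 == (j : Int)) [kv] = none := by
          simp only [List.find?]
          rw [show (blkI kv.1 == b && offI kv.1 == (j : Int)) = false by
            rcases not_and_or.mp hp with h | h <;> simp [h]]
        rw [hfind]
        by_cases hbb : b = blkI kv.1
        · rw [if_pos hbb]
          have hjj : (offI kv.1).toNat ≠ j := by
            intro he
            exact hp ⟨hbb.symm, by omega⟩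
          rw [List.getD_eq_getElem?_getD, List.getElem?_set, if_neg hjj,
            ← List.getD_eq_getElem?_getD, hbb]
        · rw [if_neg hbb]

lemma find?_reverse_keyVal (m : List (Int × Int)) (hnd : (m.map Prod.fst).Nodup) (x : Int) :
    (m.reverse.find? (fun kv => kv.1 == x)).map (·.2) = keyVal m x := by
  cases hf : m.find? (fun kv => kv.1 == x) with
  | none =>
    have hrev : m.reverse.find? (fun kv => kv.1 == x) = none := by
      rw [List.find?_eq_none] at hf ⊢
      intro kv hkv
      exact hf kv (List.mem_reverse.mp hkv)
    rw [hrev]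
    unfold keyVal
    rw [hf]
  | some kv =>
    have hmem : kv ∈ m := List.mem_of_find?_eq_some hf
    have hpred : kv.1 = x := by simpa using List.find?_some hf
    have hnd' : (m.reverse.map Prod.fst).Nodup := by
      rw [List.map_reverse]
      exact (List.nodup_reverse).mpr hnd
    have hx : (x, kv.2) ∈ m.reverse := List.mem_reverse.mpr (by rw [← hpred]; exact hmem)
    have h1 : keyVal m.reverse x = some kv.2 := keyVal_of_mem hnd' hx
    unfold keyVal at h1 ⊢
    rw [h1, hf]
    simp

lemma build_elem (m : List (Int × Int)) (hnd : (m.map Prod.fst).Nodup)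
    (b : Int) (hb : b % 32 = 0) (j : Nat) (hj : j < 32) :
    ((buildD m).getD b dflt32).getD j none = keyVal m (b + j) := by
  unfold buildD
  rw [build_elem_aux m PySem.Dict.empty b j hj (fun a => by rw [PySem.Dict.getD_empty]; rfl)]
  have hpred : (fun (kv : Int × Int) => blkI kv.1 == b && offI kv.1 == (j : Int)) =
      (fun kv => kv.1 == b + (j : Int)) := by
    funext kv
    by_cases h : kv.1 = b + (j : Int)
    · have h1 : blkI kv.1 = b := by rw [blkI_eq]; omega
      have h2 : offI kv.1 = (j : Int) := by rw [offI_eq]; omega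
      simp only [h] at h1 h2
      simp [h, h1, h2]
    · have hno : ¬(blkI kv.1 = b ∧ offI kv.1 = (j : Int)) := by
        intro hc
        have e1 := blkI_eq kv.1
        have e2 := offI_eq kv.1
        omega
      have hL : (blkI kv.1 == b && offI kv.1 == (j : Int)) = false := by
        rcases not_and_or.mp hno with h' | h' <;> simp [h']
      have hR : (kv.1 == b + (j : Int)) = false := by simp [h]
      rw [hL, hR]
  rw [hpred]
  have := find?_reverse_keyVal m hnd (b + j)
  cases hf : m.reverse.find? (fun kv => kv.1 == b + (j : Int)) with
  | none =>
    rw [hf] at this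
    simp only [Option.map_none] at this
    rw [PySem.Dict.getD_empty]
    simp only [dflt32, List.getD_eq_getElem?_getD, List.getElem?_replicate, hj, if_pos]
    exact this
  | some kv =>
    rw [hf] at this
    simp only [Option.map_some] at this
    exact this

lemma getD_buildD_eq_dense (m : List (Int × Int)) (hnd : (m.map Prod.fst).Nodup)
    (b : Int) (hb : b % 32 = 0) :
    (buildD m).getD b dflt32 = (PySem.List.pyRange 0 32).map (fun j => keyVal m (b + j)) := by
  have hlen : ((PySem.List.pyRange 0 32).map (fun j => keyVal m (b + j))).length = 32 := rfl
  apply List.ext_getElem?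
  intro j
  by_cases hj : j < 32
  · have h1 : j < ((buildD m).getD b dflt32).length := by rw [build_len]; exact hj
    rw [List.getElem?_eq_getElem h1]
    have hL : ((buildD m).getD b dflt32)[j] = ((buildD m).getD b dflt32).getD j none := by
      rw [List.getD_eq_getElem?_getD, List.getElem?_eq_getElem h1]
      rfl
    rw [hL, build_elem m hnd b hb j hj]
    rw [show (32 : Int) = ((32 : Nat) : Int) from rfl,
      PySem.List.getElem?_map_pyRange_zero (fun j => keyVal m (b + j)) 32 j hj]
  · rw [List.getElem?_eq_none (by rw [build_len]; omega),
      List.getElem?_eq_none (by rw [hlen]; omega)]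

lemma pyRange_nil {a b : Int} (h : b ≤ a) : PySem.List.pyRange a b = [] := by
  rw [List.eq_nil_iff_forall_not_mem]
  intro x hx
  rw [PySem.List.mem_pyRange_one] at hx
  omega

lemma drop_pyRange : ∀ (t : Nat) (x y : Int), (PySem.List.pyRange x y).drop t = PySem.List.pyRange (x + t) y := by
  intro t
  induction t with
  | zero => intro x y; simp
  | succ t ih =>
    intro x y
    by_cases h : x < y
    · rw [PySem.List.pyRange_one_cons h, List.drop_succ_cons, ih]
      congr 1
      push_cast
      ring
    · rw [pyRange_nil (by omega), pyRange_nil (by push_cast; omega), List.drop_nil]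

lemma take_pyRange : ∀ (t : Nat) (x y : Int), x + t ≤ y → (PySem.List.pyRange x y).take t = PySem.List.pyRange x (x + t) := by
  intro t
  induction t with
  | zero => intro x y h; simp [pyRange_nil (le_refl x)]
  | succ t ih =>
    intro x y h
    push_cast at h
    rw [PySem.List.pyRange_one_cons (by omega), List.take_succ_cons, ih (x + 1) y (by omega)]
    rw [PySem.List.pyRange_one_cons (show x < x + (t + 1 : Nat) by push_cast; omega)]
    congr 2
    push_cast
    ring

lemma slice_dense (f : Int → Option Int) (a e : Int) (h0 : 0 ≤ a) (hae : a ≤ e) (he : e ≤ 32) :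
    PySem.List.slice ((PySem.List.pyRange 0 32).map f) (some a) (some e) =
      (PySem.List.pyRange a e).map f := by
  rw [PySem.List.slice_toNat _ h0 (by omega)]
  rw [← List.map_drop, ← List.map_take, drop_pyRange]
  rw [take_pyRange (e.toNat - a.toNat) (0 + a.toNat) 32 (by omega)]
  congr 2 <;> omega

lemma pyRange_map_add (b : Int) : ∀ (n : Nat) (a e : Int), e - a = n →
    PySem.List.pyRange (b + a) (b + e) = (PySem.List.pyRange a e).map (fun j => b + j) := by
  intro n
  induction n with
  | zero =>
    intro a e h
    rw [pyRange_nil (by omega), pyRange_nil (by omega), List.map_nil]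
  | succ n ih =>
    intro a e h
    rw [PySem.List.pyRange_one_cons (show a < e by omega),
        PySem.List.pyRange_one_cons (show b + a < b + e by omega), List.map_cons]
    rw [show b + a + 1 = b + (a + 1) by ring, ih (a + 1) e (by omega)]


lemma blkI_add (b t : Int) (hb : b % 32 = 0) (h0 : 0 ≤ t) (h1 : t < 32) : blkI (b + t) = b := by
  rw [blkI_eq]
  omega

lemma keyVal_isSome_iff (m : List (Int × Int)) (x : Int) :
    (keyVal m x).isSome = true ↔ x ∈ m.map Prod.fst := by
  unfold keyVal
  rw [Option.isSome_map, List.find?_isSome]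
  constructor
  · rintro ⟨kv, hkv, hp⟩
    exact List.mem_map.mpr ⟨kv, hkv, by simpa using hp⟩
  · rintro h
    rcases List.mem_map.mp h with ⟨kv, hkv, rfl⟩
    exact ⟨kv, hkv, by simp⟩

lemma go_break (a p : Int) (ks : List Int)
    (h : ∀ y, ks.head? = some y → ¬(y = p + 1 ∧ blkI y = blkI p)) :
    go a p ks = (a, p) :: chunks ks := by
  cases ks with
  | nil => rfl
  | cons k ks =>
    simp only [go, chunks]
    rw [if_neg (h k rfl)]

lemma go_append : ∀ (xs : List Int) (a p : Int) (ys : List Int),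
    (∀ y, ys.head? = some y → ¬(y = xs.getLastD p + 1 ∧ blkI y = blkI (xs.getLastD p))) →
    go a p (xs ++ ys) = go a p xs ++ chunks ys := by
  intro xs
  induction xs with
  | nil =>
    intro a p ys h
    rw [List.nil_append, go_break a p ys (by simpa using h)]
    rfl
  | cons x xs ih =>
    intro a p ys h
    rw [List.cons_append]
    simp only [go]
    rw [List.getLastD_cons] at h
    by_cases hc : x = p + 1 ∧ blkI x = blkI p
    · rw [if_pos hc, if_pos hc, ih a x ys h]
    · rw [if_neg hc, if_neg hc, ih x x ys h, List.cons_append]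

lemma getLastD_mem : ∀ (l : List Int) (d : Int), l ≠ [] → l.getLastD d ∈ l := by
  intro l
  induction l with
  | nil => intro d h; exact absurd rfl h
  | cons x xs ih =>
    intro d _
    rw [List.getLastD_cons]
    cases hx : xs with
    | nil => simp
    | cons y ys =>
      have := ih x (by rw [hx]; exact List.cons_ne_nil y ys)
      rw [hx] at this
      exact List.mem_cons_of_mem x (by rw [← hx] at this ⊢; exact this)

lemma chunks_append (xs ys : List Int) (hx : xs ≠ [])
    (h : ∀ y, ys.head? = some y → ¬(y = xs.getLastD 0 + 1 ∧ blkI y = blkI (xs.getLastD 0))) :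
    chunks (xs ++ ys) = chunks xs ++ chunks ys := by
  cases xs with
  | nil => exact absurd rfl hx
  | cons x xs =>
    rw [List.cons_append]
    simp only [chunks]
    rw [List.getLastD_cons] at h
    exact go_append xs x x ys h

lemma chunks_flat : ∀ (sb : List Int) (seg : Int → List Int), sb.Nodup →
    (∀ bb ∈ sb, seg bb ≠ [] ∧ ∀ k ∈ seg bb, blkI k = bb) →
    chunks (sb.flatMap seg) = sb.flatMap (fun bb => chunks (seg bb)) := by
  intro sb
  induction sb with
  | nil => intro seg _ _; rfl
  | cons b sb ih =>
    intro seg hnd hseg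
    rw [List.flatMap_cons, List.flatMap_cons]
    rw [chunks_append (seg b) (sb.flatMap seg) (hseg b (by simp)).1 ?hbr]
    · rw [ih seg (List.nodup_cons.mp hnd).2 (fun bb hbb => hseg bb (List.mem_cons_of_mem b hbb))]
    case hbr =>
      intro y hy hcond
      have hymem : y ∈ sb.flatMap seg := by
        cases hl : sb.flatMap seg with
        | nil => rw [hl] at hy; simp at hy
        | cons z zs =>
          rw [hl] at hy
          simp only [List.head?_cons, Option.some.injEq] at hy
          subst hy
          simp
      rcases List.mem_flatMap.mp hymem with ⟨bb, hbb, hybb⟩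
      have h1 : blkI y = bb := (hseg bb (List.mem_cons_of_mem b hbb)).2 y hybb
      have h2 : blkI ((seg b).getLastD 0) = b :=
        (hseg b (by simp)).2 _ (getLastD_mem _ 0 (hseg b (by simp)).1)
      have h3 : bb ≠ b := fun he => (List.nodup_cons.mp hnd).1 (he ▸ hbb)
      exact h3 (by rw [← h1, hcond.2, h2])

lemma split_min (P : Int → Bool) : ∀ (sk : List Int), List.Pairwise (· < ·) sk →
    (∀ x ∈ sk, ∀ y ∈ sk, P x = true → P y = false → x < y) →
    sk.filter P ++ sk.filter (fun k => !P k) = sk := by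
  intro sk
  induction sk with
  | nil => intro _ _; rfl
  | cons k sk ih =>
    intro hpw hmin
    by_cases hP : P k = true
    · rw [List.filter_cons_of_pos hP, List.filter_cons_of_neg (by simp [hP]), List.cons_append]
      rw [ih (List.pairwise_cons.mp hpw).2
        (fun x hx y hy => hmin x (List.mem_cons_of_mem k hx) y (List.mem_cons_of_mem k hy))]
    · have hall : ∀ x ∈ k :: sk, P x = false := by
        intro x hx
        rcases List.mem_cons.mp hx with rfl | hx'
        · exact Bool.eq_false_iff.mpr hP
        · by_contra hxe
          have hPx : P x = true := by revert hxe; cases P x <;> simp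
          have := hmin x hx k (by simp) hPx (Bool.eq_false_iff.mpr hP)
          have := (List.pairwise_cons.mp hpw).1 x hx'
          omega
      rw [List.filter_eq_nil_iff.mpr (fun x hx => by rw [hall x hx]; simp), List.nil_append]
      exact List.filter_eq_self.mpr (fun x hx => by rw [hall x hx]; rfl)

lemma blkI_mono {x y : Int} (h : x ≤ y) : blkI x ≤ blkI y := by
  rw [blkI_eq, blkI_eq]
  omega

lemma group : ∀ (sb : List Int) (sk : List Int), List.Pairwise (· < ·) sb →
    List.Pairwise (· < ·) sk → (∀ bb, bb ∈ sb ↔ ∃ k ∈ sk, blkI k = bb) →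
    sb.flatMap (fun bb => sk.filter (fun k => blkI k == bb)) = sk := by
  intro sb
  induction sb with
  | nil =>
    intro sk _ _ hmem
    cases sk with
    | nil => rfl
    | cons k sk => exact absurd ((hmem (blkI k)).mpr ⟨k, by simp, rfl⟩) (by simp)
  | cons b sb ih =>
    intro sk hsb hsk hmem
    have hmin : ∀ x ∈ sk, ∀ y ∈ sk, (blkI x == b) = true → (blkI y == b) = false → x < y := by
      intro x hx y hy hPx hPy
      have hbx : blkI x = b := by simpa using hPx
      have hby : blkI y ≠ b := by simpa using hPy
      have hyb : blkI y ∈ b :: sb := (hmem (blkI y)).mpr ⟨y, hy, rfl⟩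
      have hby' : blkI y ∈ sb := by
        rcases List.mem_cons.mp hyb with he | h'
        · exact absurd he hby
        · exact h'
      have hlt : b < blkI y := (List.pairwise_cons.mp hsb).1 _ hby'
      by_contra hxy
      have : blkI y ≤ blkI x := blkI_mono (by omega)
      omega
    have hsplit := split_min (fun k => blkI k == b) sk hsk hmin
    rw [List.flatMap_cons]
    have hfc : ∀ bb ∈ sb, sk.filter (fun k => blkI k == bb) =
        (sk.filter (fun k => !(blkI k == b))).filter (fun k => blkI k == bb) := by
      intro bb hbb
      have hne : bb ≠ b := by
        have := (List.pairwise_cons.mp hsb).1 bb hbb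
        omega
      rw [List.filter_filter]
      apply List.filter_congr
      intro x _
      by_cases hx2 : blkI x = bb
      · simp [hx2, hne]
      · simp [hx2]
    have hrest : sb.flatMap (fun bb => sk.filter (fun k => blkI k == bb)) =
        sb.flatMap (fun bb => (sk.filter (fun k => !(blkI k == b))).filter (fun k => blkI k == bb)) := by
      rw [List.flatMap_def, List.flatMap_def, List.map_congr_left hfc]
    rw [hrest]
    rw [ih (sk.filter (fun k => !(blkI k == b))) (List.pairwise_cons.mp hsb).2
      (hsk.filter _) ?hmem']
    · exact hsplit
    case hmem' =>
      intro bb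
      constructor
      · intro hbb
        rcases (hmem bb).mp (List.mem_cons_of_mem b hbb) with ⟨k, hk, hkb⟩
        refine ⟨k, List.mem_filter.mpr ⟨hk, ?_⟩, hkb⟩
        have hne : bb ≠ b := by
          have := (List.pairwise_cons.mp hsb).1 bb hbb
          omega
        simp [hkb, hne]
      · rintro ⟨k, hk, rfl⟩
        have hk1 := (List.mem_filter.mp hk).1
        have hk2 := (List.mem_filter.mp hk).2
        have hne : blkI k ≠ b := by simpa using hk2
        rcases List.mem_cons.mp ((hmem (blkI k)).mpr ⟨k, hk1, rfl⟩) with he | h'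
        · exact absurd he hne
        · exact h'

lemma sjoin_cons (x : String) (l : List String) : sjoin (x :: l) = x ++ sjoin l := rfl

lemma sjoin_append (x y : List String) : sjoin (x ++ y) = sjoin x ++ sjoin y := by
  induction x with
  | nil => rw [List.nil_append, show sjoin ([] : List String) = "" from rfl, String.empty_append]
  | cons a x ih => rw [List.cons_append, sjoin_cons, sjoin_cons, ih, String.append_assoc]

lemma foldl_append_sjoin (g : Int → String) :
    ∀ (l : List Int) (s : String), l.foldl (fun s x => s ++ g x) s = s ++ sjoin (l.map g) := by
  intro l
  induction l with
  | nil => intro s; rw [List.foldl_nil, List.map_nil, sjoin, List.foldr_nil, String.append_empty]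
  | cons x l ih =>
    intro s
    rw [List.foldl_cons, ih, List.map_cons, sjoin_cons, String.append_assoc]

lemma sjoin_flatMap (r : Int × Int → String) (seg : Int → List (Int × Int)) :
    ∀ (l : List Int),
      sjoin ((l.flatMap seg).map r) = sjoin (l.map (fun x => sjoin ((seg x).map r))) := by
  intro l
  induction l with
  | nil => rfl
  | cons b l ih =>
    rw [List.flatMap_cons, List.map_append, sjoin_append, List.map_cons, sjoin_cons, ih]

-- the pending-run bookkeeping of A's per-block scan
def tailgo (b i : Int) (pend : Option Int) (ks : List Int) : List (Int × Int) :=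
  match pend with
  | some a => go (b + a) (b + i - 1) ks
  | none => chunks ks

lemma tailgo_some (b i a : Int) (ks : List Int) :
    tailgo b i (some a) ks = go (b + a) (b + i - 1) ks := rfl

lemma tailgo_none (b i : Int) (ks : List Int) : tailgo b i none ks = chunks ks := rfl

-- the trailing flush of A's per-block scan
def finA (line : List (Option Int)) (b : Int) (r : String × Int) : String :=
  if r.2 < 32 then
    r.1 ++ generateLine (b + r.2)
      ((PySem.List.slice line (some r.2) (some 32)).map (fun o => o.getD 0))
  else r.1

lemma flush_eq (m : List (Int × Int)) (b : Int) (line : List (Option Int))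
    (hline : line = (PySem.List.pyRange 0 32).map (fun j => keyVal m (b + j)))
    (a e : Int) (h0 : 0 ≤ a) (hae : a ≤ e) (he : e ≤ 32) :
    (PySem.List.slice line (some a) (some e)).map (fun o => o.getD 0) =
      (PySem.List.pyRange (b + a) (b + e)).map (vget m) := by
  rw [hline, slice_dense _ _ _ h0 hae he,
    pyRange_map_add b (e - a).toNat a e (by omega), List.map_map, List.map_map]
  rfl

lemma coreA (m : List (Int × Int)) (b : Int) (hb : b % 32 = 0)
    (line : List (Option Int))
    (hline : line = (PySem.List.pyRange 0 32).map (fun j => keyVal m (b + j))) :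
    ∀ (n : Nat) (i : Int), i = 32 - (n : Int) → 0 ≤ i →
    ∀ (s : String) (pend : Option Int) (ks : List Int),
      (∀ a, pend = some a → 0 ≤ a ∧ a < i ∧
        ∀ t : Int, a ≤ t → t < i → (keyVal m (b + t)).isSome = true) →
      (∀ k ∈ ks, b + i ≤ k ∧ k < b + 32) →
      List.Pairwise (· < ·) ks →
      (∀ j : Int, i ≤ j → j < 32 → ((keyVal m (b + j)).isSome = true ↔ (b + j) ∈ ks)) →
      finA line b ((PySem.List.pyRange i 32).foldl
          (fun p j => stepA line b p (j, PySem.List.pyGetD line j none)) (s, pend.getD i)) =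
        s ++ sjoin ((tailgo b i pend ks).map (render m)) := by
  intro n
  induction n with
  | zero =>
    intro i hi h0 s pend ks hpend hks hpw hiff
    have hi32 : i = 32 := by omega
    subst hi32
    have hksnil : ks = [] := by
      cases ks with
      | nil => rfl
      | cons k ks => exact absurd (hks k (by simp)) (by omega)
    subst hksnil
    rw [pyRange_nil le_rfl, List.foldl_nil]
    cases pend with
    | none =>
      simp only [Option.getD_none, finA]
      rw [if_neg (by omega), tailgo_none]
      simp only [chunks, List.map_nil, sjoin, List.foldr_nil, String.append_empty]
    | some a =>
      rcases hpend a rfl with ⟨ha0, ha32, _⟩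
      simp only [Option.getD_some, finA]
      rw [if_pos (by omega)]
      rw [flush_eq m b line hline a 32 ha0 (by omega) le_rfl]
      rw [tailgo_some]
      simp only [go, List.map_cons, List.map_nil, sjoin, render]
      rw [show b + 32 - 1 + 1 = b + 32 by ring]
      rw [List.foldr_cons, List.foldr_nil, String.append_empty]
  | succ n ih =>
    intro i hi h0 s pend ks hpend hks hpw hiff
    have hi32 : i < 32 := by omega
    rw [PySem.List.pyRange_one_cons hi32, List.foldl_cons]
    have hget : PySem.List.pyGetD line i none = keyVal m (b + i) := by
      rw [hline]
      exact PySem.List.pyGetD_map_pyRange_of_nonneg _ 32 i none h0 hi32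
    by_cases hv : keyVal m (b + i) = none
    · -- gap at position i
      have hnotmem : (b + i) ∉ ks := by
        intro hmem
        have := (hiff i le_rfl hi32).mpr hmem
        rw [hv] at this
        simp at this
      have hks' : ∀ k ∈ ks, b + (i + 1) ≤ k ∧ k < b + 32 := by
        intro k hk
        rcases hks k hk with ⟨h1, h2⟩
        have : k ≠ b + i := fun he => hnotmem (he ▸ hk)
        omega
      have hiff' : ∀ j : Int, i + 1 ≤ j → j < 32 →
          ((keyVal m (b + j)).isSome = true ↔ (b + j) ∈ ks) :=
        fun j hj1 hj2 => hiff j (by omega) hj2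
      cases pend with
      | none =>
        have hstep : stepA line b (s, (none : Option Int).getD i)
            (i, PySem.List.pyGetD line i none) = (s, i + 1) := by
          rw [hget]
          simp only [stepA, Option.getD_none]
          rw [if_pos hv, if_neg (by omega)]
        rw [hstep]
        have := ih (i + 1) (by omega) (by omega) s none ks
          (by intro a ha; cases ha) hks' hpw hiff'
        rw [tailgo_none] at this
        rw [tailgo_none]
        simpa using this
      | some a =>
        rcases hpend a rfl with ⟨ha0, hai, harun⟩
        have hstep : stepA line b (s, (some a).getD i)
            (i, PySem.List.pyGetD line i none) =
            (s ++ generateLine (b + a)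
              ((PySem.List.slice line (some a) (some i)).map (fun o => o.getD 0)), i + 1) := by
          rw [hget]
          simp only [stepA, Option.getD_some]
          rw [if_pos hv, if_pos hai]
        rw [hstep]
        rw [flush_eq m b line hline a i ha0 (by omega) (by omega)]
        have hrend : generateLine (b + a) ((PySem.List.pyRange (b + a) (b + i)).map (vget m)) =
            render m (b + a, b + i - 1) := by
          simp only [render]
          rw [show b + i - 1 + 1 = b + i by ring]
        have := ih (i + 1) (by omega) (by omega)
          (s ++ generateLine (b + a) ((PySem.List.pyRange (b + a) (b + i)).map (vget m)))
          none ks (by intro a' ha'; cases ha') hks' hpw hiff'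
        simp only [Option.getD_none] at this
        rw [tailgo_none] at this
        rw [this, tailgo_some]
        have hgo : go (b + a) (b + i - 1) ks = (b + a, b + i - 1) :: chunks ks := by
          apply go_break
          intro y hy hc
          have hymem : y ∈ ks := by
            cases hl : ks with
            | nil => rw [hl] at hy; simp at hy
            | cons z zs =>
              rw [hl] at hy
              simp only [List.head?_cons, Option.some.injEq] at hy
              subst hy
              simp
          exact hnotmem (by rw [show b + i = y by omega]; exact hymem)
        rw [hgo, List.map_cons, sjoin_cons, hrend, String.append_assoc]
    · -- key present at position i
      have hsome : (keyVal m (b + i)).isSome = true := Option.ne_none_iff_isSome.mp hv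
      have hmem : (b + i) ∈ ks := (hiff i le_rfl hi32).mp hsome
      obtain ⟨ks', rfl⟩ : ∃ ks', ks = (b + i) :: ks' := by
        cases ks with
        | nil => simp at hmem
        | cons k ks' =>
          rcases List.mem_cons.mp hmem with he | hmem'
          · exact ⟨ks', by rw [he]⟩
          · have h1 := (List.pairwise_cons.mp hpw).1 _ hmem'
            have h2 := (hks k (by simp)).1
            omega
      have hks' : ∀ k ∈ ks', b + (i + 1) ≤ k ∧ k < b + 32 := by
        intro k hk
        have h1 := (List.pairwise_cons.mp hpw).1 k hk
        have h2 := (hks k (List.mem_cons_of_mem _ hk)).2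
        omega
      have hpw' := (List.pairwise_cons.mp hpw).2
      have hiff' : ∀ j : Int, i + 1 ≤ j → j < 32 →
          ((keyVal m (b + j)).isSome = true ↔ (b + j) ∈ ks') := by
        intro j hj1 hj2
        rw [hiff j (by omega) hj2]
        constructor
        · intro h
          rcases List.mem_cons.mp h with he | h'
          · omega
          · exact h'
        · exact fun h => List.mem_cons_of_mem _ h
      cases pend with
      | none =>
        have hstep : stepA line b (s, (none : Option Int).getD i)
            (i, PySem.List.pyGetD line i none) = (s, i) := by
          rw [hget]
          simp only [stepA, Option.getD_none]
          rw [if_neg hv]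
        rw [hstep]
        have := ih (i + 1) (by omega) (by omega) s (some i) ks'
          (by
            intro a' ha'
            injection ha' with ha'
            subst ha'
            exact ⟨h0, by omega, fun t ht1 ht2 => by
              rw [show t = i by omega]
              exact hsome⟩)
          hks' hpw' hiff'
        simp only [Option.getD_some] at this
        rw [tailgo_some] at this
        rw [this, tailgo_none]
        rw [show b + (i + 1) - 1 = b + i by ring]
        rfl
      | some a =>
        rcases hpend a rfl with ⟨ha0, hai, harun⟩
        have hstep : stepA line b (s, (some a).getD i)
            (i, PySem.List.pyGetD line i none) = (s, a) := by
          rw [hget]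
          simp only [stepA, Option.getD_some]
          rw [if_neg hv]
        rw [hstep]
        have := ih (i + 1) (by omega) (by omega) s (some a) ks'
          (by
            intro a' ha'
            injection ha' with ha'
            subst ha'
            refine ⟨ha0, by omega, fun t ht1 ht2 => ?_⟩
            by_cases ht : t < i
            · exact harun t ht1 ht
            · rw [show t = i by omega]
              exact hsome)
          hks' hpw' hiff'
        simp only [Option.getD_some] at this
        rw [tailgo_some] at this
        rw [this, tailgo_some]
        have hgo : go (b + a) (b + i - 1) ((b + i) :: ks') = go (b + a) (b + (i + 1) - 1) ks' := by
          simp only [go]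
          rw [if_pos ⟨by ring, by
            rw [blkI_add b i hb h0 (by omega), show b + i - 1 = b + (i - 1) by ring,
              blkI_add b (i - 1) hb (by omega) (by omega)]⟩]
          rw [show b + (i + 1) - 1 = b + i by ring]
        rw [hgo]

lemma bodyA_eq (m : List (Int × Int)) (hnd : (m.map Prod.fst).Nodup)
    (bb : Int) (hbb : bb % 32 = 0) (s : String) :
    bodyA (buildD m) s bb =
      s ++ sjoin ((chunks ((PySem.List.sorted (m.map Prod.fst) (fun x => x)).filter
        (fun k => blkI k == bb))).map (render m)) := by
  have hline := getD_buildD_eq_dense m hnd bb hbb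
  have hbody : bodyA (buildD m) s bb =
      finA ((buildD m).getD bb dflt32) bb
        ((PySem.List.enumerate ((buildD m).getD bb dflt32)).foldl
          (stepA ((buildD m).getD bb dflt32) bb) (s, 0)) := rfl
  rw [hbody]
  rw [PySem.List.enumerate_eq_map_pyRange ((buildD m).getD bb dflt32) none, List.foldl_map]
  have hlen : PySem.List.len ((buildD m).getD bb dflt32) = 32 := by
    rw [hline]
    rfl
  rw [hlen]
  have hcore := coreA m bb hbb ((buildD m).getD bb dflt32) hline 32 0 (by norm_num) le_rfl
    s none ((PySem.List.sorted (m.map Prod.fst) (fun x => x)).filter (fun k => blkI k == bb))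
    (by intro a ha; cases ha)
    (by
      intro k hk
      have h2 := (List.mem_filter.mp hk).2
      have : blkI k = bb := by simpa using h2
      rw [blkI_eq] at this
      omega)
    ((sortedKeys_pairwise_lt hnd).filter _)
    (by
      intro j hj1 hj2
      rw [keyVal_isSome_iff, List.mem_filter]
      have hblk : blkI (bb + j) = bb := blkI_add bb j hbb hj1 hj2
      constructor
      · intro hm
        refine ⟨?_, by simp [hblk]⟩
        rw [PySem.List.mem_sorted]
        exact hm
      · intro hm
        have := hm.1
        rw [PySem.List.mem_sorted] at this
        exact this)
  rw [tailgo_none] at hcore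
  simpa using hcore

lemma generate_eq_canon (m : List (Int × Int)) (h : Pre_generate m) :
    generate m = canon m := by
  obtain ⟨hnd, _⟩ := h
  rw [generate_unfold, canon]
  have hsb_nd : (PySem.List.sorted (buildD m).keys (fun x => x)).Nodup :=
    (PySem.List.sorted_perm (buildD m).keys (fun x => x) false).nodup_iff.mpr (build_keys_nodup m)
  have hsb_pw : List.Pairwise (· < ·) (PySem.List.sorted (buildD m).keys (fun x => x)) :=
    ((PySem.List.sorted_pairwise (buildD m).keys (fun x => x)).and hsb_nd).imp
      (fun hx => lt_of_le_of_ne hx.1 hx.2)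
  have hsb_mem : ∀ bb, bb ∈ PySem.List.sorted (buildD m).keys (fun x => x) ↔
      ∃ kv ∈ m, blkI kv.1 = bb := by
    intro bb
    rw [PySem.List.mem_sorted]
    exact build_keys_mem m bb
  have halign : ∀ bb ∈ PySem.List.sorted (buildD m).keys (fun x => x), bb % 32 = 0 := by
    intro bb hbb
    rcases (hsb_mem bb).mp hbb with ⟨kv, _, rfl⟩
    rw [blkI_eq]
    omega
  rw [PySem.List.foldl_congr_mem _ (bodyA (buildD m))
    (fun s bb => s ++ sjoin ((chunks ((PySem.List.sorted (m.map Prod.fst) (fun x => x)).filter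
      (fun k => blkI k == bb))).map (render m))) ""
    (fun s bb hbb => bodyA_eq m hnd bb (halign bb hbb) s)]
  rw [foldl_append_sjoin _ _ "", String.empty_append]
  congr 1
  have hgroup := group (PySem.List.sorted (buildD m).keys (fun x => x))
    (PySem.List.sorted (m.map Prod.fst) (fun x => x)) hsb_pw (sortedKeys_pairwise_lt hnd)
    (by
      intro bb
      rw [hsb_mem bb]
      constructor
      · rintro ⟨kv, hkv, rfl⟩
        exact ⟨kv.1, by rw [PySem.List.mem_sorted]; exact List.mem_map.mpr ⟨kv, hkv, rfl⟩, rfl⟩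
      · rintro ⟨k, hk, rfl⟩
        rw [PySem.List.mem_sorted] at hk
        rcases List.mem_map.mp hk with ⟨kv, hkv, rfl⟩
        exact ⟨kv, hkv, rfl⟩)
  have hflat := chunks_flat (PySem.List.sorted (buildD m).keys (fun x => x))
    (fun bb => (PySem.List.sorted (m.map Prod.fst) (fun x => x)).filter (fun k => blkI k == bb))
    hsb_nd
    (by
      intro bb hbb
      constructor
      · rcases (hsb_mem bb).mp hbb with ⟨kv, hkv, rfl⟩
        have : kv.1 ∈ (PySem.List.sorted (m.map Prod.fst) (fun x => x)).filter
            (fun k => blkI k == blkI kv.1) := by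
          rw [List.mem_filter]
          exact ⟨by rw [PySem.List.mem_sorted]; exact List.mem_map.mpr ⟨kv, hkv, rfl⟩, by simp⟩
        intro he
        simp only [List.eq_nil_iff_forall_not_mem] at he
        exact he _ this
      · intro k hk
        have := (List.mem_filter.mp hk).2
        simpa using this)
  rw [← sjoin_flatMap (render m)
    (fun bb => chunks ((PySem.List.sorted (m.map Prod.fst) (fun x => x)).filter
      (fun k => blkI k == bb)))
    (PySem.List.sorted (buildD m).keys (fun x => x)), ← hflat, hgroup]

-- ===== VERDICT (by name: the statement is the Claim_ definition above) =====
theorem generate_spec : Claim_equal_generate := by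
  intro m _ hpre
  unfold Spec_generate
  rw [generate_eq_canon m hpre, generate_alt_eq_canon m hpre]
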